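-- pv_equiv track=rewrite | github.com/MrKaStep/csc230-grader | grader.py | expand_message
-- ===== SOURCE A (Python) =====
-- def expand_message(message):
--     macros = {
--         # Formatting and magic numbers
--         "CURLY1": "Incorrect curly bracket placement in function definitions",
--         "CURLY2": "Incorrect curly bracket placement in control structures",
--         "ASCII!": "No need to define ASCII codes, it only hurts readability. Use literals",
--         "LIMITS": "No need to define LONG_MIN and LONG_MAX: they are defined in limits.h",
--         # Block comments
--         "HEADER": "For functions that have a prototype in the header, the comment should be in the header, not the source",
--         "DUPLICATE": "Don't duplicate comments in both source AND header",
--         "TOP": "File comments should start at the very top of the file",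
--     }
--
--     for k, v in macros.items():
--         message = message.replace(k, v)
--
--     return message
-- ===== SOURCE B (Python) =====
-- def expand_message(message):
--     macros = {
--         "CURLY1": "Incorrect curly bracket placement in function definitions",
--         "CURLY2": "Incorrect curly bracket placement in control structures",
--         "ASCII!": "No need to define ASCII codes, it only hurts readability. Use literals",
--         "LIMITS": "No need to define LONG_MIN and LONG_MAX: they are defined in limits.h",
--         "HEADER": "For functions that have a prototype in the header, the comment should be in the header, not the source",
--         "DUPLICATE": "Don't duplicate comments in both source AND header",
--         "TOP": "File comments should start at the very top of the file",
--     }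
--     out = []
--     i = 0
--     n = len(message)
--     while i < n:
--         for k, v in macros.items():
--             if message.startswith(k, i):
--                 out.append(v)
--                 i += len(k)
--                 break
--         else:
--             out.append(message[i])
--             i += 1
--     return ''.join(out)
-- ===== Notes on version B (the rewrite author's own statement) =====
-- stated objective: alternative
-- what changed: B replaces the seven sequential full-message str.replace passes by a single left-to-right scan that at each position looks the macro table up and substitutes in place (safe because no key overlaps another key or any replacement text).
import Mathlib
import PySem

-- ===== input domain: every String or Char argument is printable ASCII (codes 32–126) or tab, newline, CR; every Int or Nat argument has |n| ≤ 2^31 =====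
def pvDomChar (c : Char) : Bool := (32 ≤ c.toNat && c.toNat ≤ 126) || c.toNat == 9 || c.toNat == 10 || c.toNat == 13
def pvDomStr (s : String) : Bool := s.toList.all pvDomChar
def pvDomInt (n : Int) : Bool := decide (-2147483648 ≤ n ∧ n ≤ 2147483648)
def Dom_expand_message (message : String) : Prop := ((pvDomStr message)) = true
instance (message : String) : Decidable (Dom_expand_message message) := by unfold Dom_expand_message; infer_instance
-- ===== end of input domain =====

-- B replaces A's seven sequential full-message replace passes by one left-to-right scan with a
-- table lookup at each position (objective: alternative single-pass algorithm, same result).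

-- ===== PORT A =====
-- the Python dict literal (distinct keys); `.items()` iterates in insertion order = this list
def pvAMacros : List (String × String) :=
  [("CURLY1", "Incorrect curly bracket placement in function definitions"),
   ("CURLY2", "Incorrect curly bracket placement in control structures"),
   ("ASCII!", "No need to define ASCII codes, it only hurts readability. Use literals"),
   ("LIMITS", "No need to define LONG_MIN and LONG_MAX: they are defined in limits.h"),
   ("HEADER", "For functions that have a prototype in the header, the comment should be in the header, not the source"),
   ("DUPLICATE", "Don't duplicate comments in both source AND header"),
   ("TOP", "File comments should start at the very top of the file")]

def expand_message (message : String) : String :=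
  pvAMacros.foldl (fun m kv => PySem.Str.replace m kv.1 kv.2) message

-- ===== PORT B =====
-- the same table, on the character-list side (B scans characters)
def pvBTable : List (List Char × List Char) :=
  [("CURLY1".toList, "Incorrect curly bracket placement in function definitions".toList),
   ("CURLY2".toList, "Incorrect curly bracket placement in control structures".toList),
   ("ASCII!".toList, "No need to define ASCII codes, it only hurts readability. Use literals".toList),
   ("LIMITS".toList, "No need to define LONG_MIN and LONG_MAX: they are defined in limits.h".toList),
   ("HEADER".toList, "For functions that have a prototype in the header, the comment should be in the header, not the source".toList),
   ("DUPLICATE".toList, "Don't duplicate comments in both source AND header".toList),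
   ("TOP".toList, "File comments should start at the very top of the file".toList)]

-- hand port of Source B's while loop (exact): `i` is the scan position, here the already-dropped
-- prefix; the fuel is the number of unscanned characters, which bounds the loop count since
-- every iteration consumes at least one character (all keys are nonempty); `out`/`join`
-- becomes building the result list front-to-back.
def pvScanGo : List (List Char × List Char) → Nat → List Char → List Char
  | _, 0, l => l
  | _, _ + 1, [] => []
  | tbl, fuel + 1, c :: t =>
    match tbl.find? (fun p => p.1.isPrefixOf (c :: t)) with
    | some p => p.2 ++ pvScanGo tbl fuel ((c :: t).drop p.1.length)
    | none => c :: pvScanGo tbl fuel t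

def expand_message_alt (message : String) : String :=
  String.ofList (pvScanGo pvBTable message.toList.length message.toList)

-- ===== PRECONDITION & SPEC =====
def Spec_expand_message (message : String) (out : String) : Prop := out = expand_message_alt message
instance (message : String) (out : String) : Decidable (Spec_expand_message message out) := by unfold Spec_expand_message; infer_instance

-- ===== CLAIM (what is proved, stated in full; the proofs are below) =====
def Claim_equal_expand_message : Prop := ∀ (message : String), Dom_expand_message message → Spec_expand_message message (expand_message message)

-- ===== LEMMAS AND PROOFS =====

-- A clean accumulator-free version of PySem.Chars.replace's fuelled loop.
def pvRepGo : List Char → List Char → Nat → List Char → List Char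
  | _, _, 0, l => l
  | _, _, _ + 1, [] => []
  | old, new, f + 1, c :: t =>
    if old.isPrefixOf (c :: t) then new ++ pvRepGo old new f ((c :: t).drop old.length)
    else c :: pvRepGo old new f t

def pvRep (old new l : List Char) : List Char := pvRepGo old new l.length l

def pvScan (tbl : List (List Char × List Char)) (l : List Char) : List Char :=
  pvScanGo tbl l.length l

-- mutual non-prefix (abbrev so that decidability instances see through it)
abbrev pvNoPre (a b : List Char) : Prop := ¬ a <+: b ∧ ¬ b <+: a

-- the non-interaction conditions of the macro table (checked by `decide` below):
-- keys are pairwise prefix-free and overlap-free, no key suffix starts a value and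
-- no value suffix starts a key, keys have length ≥ 2, values are nonempty.
def pvGood (T : List (List Char × List Char)) : Prop :=
  (T.map (·.1)).Nodup ∧
  (∀ p ∈ T, 2 ≤ p.1.length ∧ p.2 ≠ []) ∧
  (∀ p ∈ T, ∀ q ∈ T,
    (p.1 ≠ q.1 → ¬ q.1 <+: p.1) ∧
    (∀ j, j < q.1.length → 1 ≤ j → pvNoPre (q.1.drop j) p.1) ∧
    (∀ j, j < q.1.length → pvNoPre (q.1.drop j) p.2) ∧
    (∀ i, i < p.2.length → pvNoPre q.1 (p.2.drop i)))

theorem pvReplaceGo_acc (old new : List Char) :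
    ∀ (f : Nat) (l acc : List Char),
      PySem.Chars.replace.go old new f l acc = acc.reverse ++ PySem.Chars.replace.go old new f l [] := by
  intro f
  induction f with
  | zero => intro l acc; rw [PySem.Chars.replace.go, PySem.Chars.replace.go] <;> simp
  | succ f ih =>
    intro l acc
    cases l with
    | nil => rw [PySem.Chars.replace.go, PySem.Chars.replace.go] <;> simp
    | cons c t =>
      rw [PySem.Chars.replace.go, PySem.Chars.replace.go]
      by_cases h : old.isPrefixOf (c :: t)
      · simp only [h, if_true]
        rw [ih ((c :: t).drop old.length) (new.reverse ++ acc),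
            ih ((c :: t).drop old.length) (new.reverse ++ [])]
        simp
      · simp only [h, if_false, Bool.false_eq_true]
        rw [ih t (c :: acc), ih t [c]]
        simp

theorem pvReplaceGo_eq_repGo (old new : List Char) :
    ∀ (f : Nat) (l : List Char),
      PySem.Chars.replace.go old new f l [] = pvRepGo old new f l := by
  intro f
  induction f with
  | zero => intro l; rw [PySem.Chars.replace.go] <;> simp [pvRepGo]
  | succ f ih =>
    intro l
    cases l with
    | nil => rw [PySem.Chars.replace.go] <;> simp [pvRepGo]
    | cons c t =>
      rw [PySem.Chars.replace.go]
      by_cases h : old.isPrefixOf (c :: t)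
      · simp only [h, if_true, pvRepGo]
        rw [pvReplaceGo_acc old new f ((c :: t).drop old.length) (new.reverse ++ [])]
        simp [ih]
      · simp only [h, if_false, Bool.false_eq_true, pvRepGo]
        rw [pvReplaceGo_acc old new f t [c]]
        simp [ih]

theorem pvReplace_eq_rep (l old new : List Char) (h : old ≠ []) :
    PySem.Chars.replace l old new = pvRep old new l := by
  rw [PySem.Chars.replace]
  simp only [List.isEmpty_iff, h, if_false]
  exact pvReplaceGo_eq_repGo old new l.length l

theorem pvRepGo_fuel (old new : List Char) (h : old ≠ []) :
    ∀ (f₁ : Nat), ∀ (l : List Char) (f₂ : Nat), l.length ≤ f₁ → l.length ≤ f₂ →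
      pvRepGo old new f₁ l = pvRepGo old new f₂ l := by
  intro f₁
  induction f₁ with
  | zero =>
    intro l f₂ h1 _
    have : l = [] := List.eq_nil_of_length_eq_zero (Nat.le_zero.mp h1)
    subst this; cases f₂ <;> simp [pvRepGo]
  | succ f ih =>
    intro l f₂ h1 h2
    cases l with
    | nil => cases f₂ <;> simp [pvRepGo]
    | cons c t =>
      cases f₂ with
      | zero => simp at h2
      | succ f₂ =>
        have hold : 1 ≤ old.length := by
          cases old with
          | nil => exact absurd rfl h
          | cons _ _ => simp
        simp only [pvRepGo]
        by_cases hp : old.isPrefixOf (c :: t)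
        · simp only [hp, if_true]
          have hlen : ((c :: t).drop old.length).length ≤ t.length := by
            simp [List.length_drop]; omega
          rw [ih _ f₂ (le_trans hlen (by simpa using h1)) (le_trans hlen (by simpa using h2))]
        · simp only [hp, if_false, Bool.false_eq_true]
          rw [ih t f₂ (by simpa using h1) (by simpa using h2)]

theorem pvRep_nil (old new : List Char) : pvRep old new [] = [] := rfl

theorem pvRep_pos (old new : List Char) (c : Char) (t : List Char)
    (h : old ≠ []) (hp : old <+: (c :: t)) :
    pvRep old new (c :: t) = new ++ pvRep old new ((c :: t).drop old.length) := by
  have hp' : old.isPrefixOf (c :: t) = true := List.isPrefixOf_iff_prefix.mpr hp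
  have hold : 1 ≤ old.length := by
    cases old with
    | nil => exact absurd rfl h
    | cons _ _ => simp
  show pvRepGo old new (t.length + 1) (c :: t) = _
  simp only [pvRepGo, hp', if_true]
  congr 1
  exact pvRepGo_fuel old new h t.length _ _ (by simp [List.length_drop]; omega) le_rfl

theorem pvRep_neg (old new : List Char) (c : Char) (t : List Char)
    (hp : ¬ old <+: (c :: t)) :
    pvRep old new (c :: t) = c :: pvRep old new t := by
  have hp' : old.isPrefixOf (c :: t) = false := by
    rw [Bool.eq_false_iff]
    intro hc; exact hp (List.isPrefixOf_iff_prefix.mp hc)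
  show pvRepGo old new (t.length + 1) (c :: t) = _
  simp only [pvRepGo, hp', Bool.false_eq_true, if_false]
  rfl

theorem pvScanGo_fuel (tbl : List (List Char × List Char)) (hk : ∀ p ∈ tbl, p.1 ≠ []) :
    ∀ (f₁ : Nat), ∀ (l : List Char) (f₂ : Nat), l.length ≤ f₁ → l.length ≤ f₂ →
      pvScanGo tbl f₁ l = pvScanGo tbl f₂ l := by
  intro f₁
  induction f₁ with
  | zero =>
    intro l f₂ h1 _
    have : l = [] := List.eq_nil_of_length_eq_zero (Nat.le_zero.mp h1)
    subst this; cases f₂ <;> simp [pvScanGo]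
  | succ f ih =>
    intro l f₂ h1 h2
    cases l with
    | nil => cases f₂ <;> simp [pvScanGo]
    | cons c t =>
      cases f₂ with
      | zero => simp at h2
      | succ f₂ =>
        cases hf : tbl.find? (fun p => p.1.isPrefixOf (c :: t)) with
        | none =>
          simp only [pvScanGo, hf]
          rw [ih t f₂ (by simpa using h1) (by simpa using h2)]
        | some p =>
          have hmem := List.mem_of_find?_eq_some hf
          have hold : 1 ≤ p.1.length := by
            have := hk p hmem
            cases hpp : p.1 with
            | nil => exact absurd hpp this
            | cons _ _ => simp
          have hlen : ((c :: t).drop p.1.length).length ≤ t.length := by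
            simp [List.length_drop]; omega
          simp only [pvScanGo, hf]
          rw [ih _ f₂ (le_trans hlen (by simpa using h1)) (le_trans hlen (by simpa using h2))]

theorem pvScan_nilTbl : ∀ (f : Nat) (l : List Char), pvScanGo [] f l = l := by
  intro f
  induction f with
  | zero => intro l; simp [pvScanGo]
  | succ f ih =>
    intro l
    cases l with
    | nil => simp [pvScanGo]
    | cons c t => simp [pvScanGo, List.find?, ih]

theorem pvScan_nomatch (tbl : List (List Char × List Char)) (c : Char) (t : List Char)
    (hf : tbl.find? (fun p => p.1.isPrefixOf (c :: t)) = none) :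
    pvScan tbl (c :: t) = c :: pvScan tbl t := by
  show pvScanGo tbl (t.length + 1) (c :: t) = _
  simp only [pvScanGo, hf]
  rfl

theorem pvScan_match (tbl : List (List Char × List Char)) (hk : ∀ p ∈ tbl, p.1 ≠ [])
    (c : Char) (t : List Char) (p : List Char × List Char)
    (hf : tbl.find? (fun p => p.1.isPrefixOf (c :: t)) = some p) :
    pvScan tbl (c :: t) = p.2 ++ pvScan tbl ((c :: t).drop p.1.length) := by
  have hmem := List.mem_of_find?_eq_some hf
  have hold : 1 ≤ p.1.length := by
    have := hk p hmem
    cases hpp : p.1 with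
    | nil => exact absurd hpp this
    | cons _ _ => simp
  show pvScanGo tbl (t.length + 1) (c :: t) = _
  simp only [pvScanGo, hf]
  congr 1
  exact pvScanGo_fuel tbl hk t.length _ _ (by simp [List.length_drop]; omega) le_rfl

theorem pvFind?_congr {α : Type} (p q : α → Bool) :
    ∀ (l : List α), (∀ x ∈ l, p x = q x) → l.find? p = l.find? q := by
  intro l
  induction l with
  | nil => intro _; rfl
  | cons a l ih =>
    intro h
    simp only [List.find?]
    rw [h a (by simp)]
    cases q a
    · simpa using ih (fun x hx => h x (by simp [hx]))
    · simp

-- occurrences of other keys survive one `replace` pass unchanged (both ways)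
theorem pvPres (T : List (List Char × List Char)) (hg : pvGood T)
    (p : List Char × List Char) (hp : p ∈ T) (q : List Char × List Char) (hq : q ∈ T)
    (hne : q.1 ≠ p.1) :
    ∀ (n : Nat) (s : List Char), s.length ≤ n → ∀ (j : Nat), j < q.1.length →
      (q.1.drop j <+: pvRep p.1 p.2 s ↔ q.1.drop j <+: s) := by
  intro n
  induction n with
  | zero =>
    intro s hs j hj
    have : s = [] := List.eq_nil_of_length_eq_zero (Nat.le_zero.mp hs)
    subst this
    rw [pvRep_nil]
  | succ n ih =>
    intro s hs j hj
    have hdj : q.1.drop j ≠ [] := by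
      intro hc
      have := List.length_drop (l := q.1) (i := j)
      rw [hc] at this
      simp at this
      omega
    cases s with
    | nil => rw [pvRep_nil]
    | cons c t =>
      obtain ⟨hnodup, hsz, hpair⟩ := hg
      have hknil : p.1 ≠ [] := by
        intro hc
        have := (hsz p hp).1
        rw [hc] at this; simp at this
      by_cases hpre : p.1 <+: (c :: t)
      · rw [pvRep_pos p.1 p.2 c t hknil hpre]
        constructor
        · intro h
          rcases List.prefix_or_prefix_of_prefix h (List.prefix_append p.2 _) with h' | h'
          · exact absurd h' ((hpair p hp q hq).2.2.1 j hj).1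
          · exact absurd h' ((hpair p hp q hq).2.2.1 j hj).2
        · intro h
          rcases List.prefix_or_prefix_of_prefix h hpre with h' | h'
          · rcases Nat.eq_zero_or_pos j with hj0 | hj1
            · subst hj0
              simp only [List.drop_zero] at h'
              exact absurd h' ((hpair p hp q hq).1 hne.symm)
            · exact absurd h' ((hpair p hp q hq).2.1 j hj hj1).1
          · rcases Nat.eq_zero_or_pos j with hj0 | hj1
            · subst hj0
              simp only [List.drop_zero] at h'
              exact absurd h' ((hpair q hq p hp).1 hne)
            · exact absurd h' ((hpair p hp q hq).2.1 j hj hj1).2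
      · rw [pvRep_neg p.1 p.2 c t hpre]
        rw [List.drop_eq_getElem_cons hj, List.cons_prefix_cons, List.cons_prefix_cons]
        rcases Nat.lt_or_ge (j + 1) q.1.length with hj1 | hj1
        · rw [ih t (by simpa using hs) (j + 1) hj1]
        · have : q.1.drop (j + 1) = [] := List.drop_eq_nil_of_le hj1
          rw [this]
          simp [List.nil_prefix]

-- the scan walks over a freshly substituted value without matching anything in it
theorem pvScanSkip (tbl : List (List Char × List Char)) :
    ∀ (w u : List Char),
      (∀ i, i < w.length → ∀ q ∈ tbl, pvNoPre q.1 (w.drop i)) →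
      pvScan tbl (w ++ u) = w ++ pvScan tbl u := by
  intro w
  induction w with
  | nil => intro u _; simp
  | cons c w' ih =>
    intro u hcond
    have hnone : tbl.find? (fun p => p.1.isPrefixOf (c :: (w' ++ u))) = none := by
      rw [List.find?_eq_none]
      intro q hq hc
      have hpre : q.1 <+: (c :: w') ++ u := by
        simpa using List.isPrefixOf_iff_prefix.mp hc
      rcases List.prefix_or_prefix_of_prefix hpre (List.prefix_append (c :: w') u) with h' | h'
      · exact (hcond 0 (by simp) q hq).1 (by simpa using h')
      · exact (hcond 0 (by simp) q hq).2 (by simpa using h')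
    have : pvScan tbl ((c :: w') ++ u) = c :: pvScan tbl (w' ++ u) := by
      simpa using pvScan_nomatch tbl c (w' ++ u) hnone
    rw [this, ih u (fun i hi q hq => by simpa using hcond (i + 1) (by simp; omega) q hq)]
    simp

-- `replace` walks over a matched other key's tail without touching it
theorem pvRepSkip (k v : List Char) :
    ∀ (w u : List Char),
      (∀ i, i < w.length → pvNoPre k (w.drop i)) →
      pvRep k v (w ++ u) = w ++ pvRep k v u := by
  intro w
  induction w with
  | nil => intro u _; simp
  | cons c w' ih =>
    intro u hcond
    have hnp : ¬ k <+: (c :: (w' ++ u)) := by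
      intro hc
      have hpre : k <+: (c :: w') ++ u := by simpa using hc
      rcases List.prefix_or_prefix_of_prefix hpre (List.prefix_append (c :: w') u) with h' | h'
      · exact (hcond 0 (by simp)).1 (by simpa using h')
      · exact (hcond 0 (by simp)).2 (by simpa using h')
    have : pvRep k v ((c :: w') ++ u) = c :: pvRep k v (w' ++ u) := by
      simpa using pvRep_neg k v c (w' ++ u) hnp
    rw [this, ih u (fun i hi => by simpa using hcond (i + 1) (by simp; omega))]
    simp

-- one sequential replace pass followed by the scan over the remaining keys
-- equals the scan over all keys
theorem pvScanRep (T : List (List Char × List Char)) (hg : pvGood T)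
    (kv : List Char × List Char) (L' : List (List Char × List Char))
    (hsuf : (kv :: L') <:+ T) :
    ∀ (n : Nat) (s : List Char), s.length ≤ n →
      pvScan L' (pvRep kv.1 kv.2 s) = pvScan (kv :: L') s := by
  have hmemT : ∀ q ∈ kv :: L', q ∈ T := fun q hq => hsuf.sublist.subset hq
  have hmem : kv ∈ T := hmemT kv (by simp)
  have hknil : ∀ q ∈ kv :: L', q.1 ≠ [] := by
    intro q hq hc
    have := (hg.2.1 q (hmemT q hq)).1
    rw [hc] at this; simp at this
  have hknil' : ∀ q ∈ L', q.1 ≠ [] := fun q hq => hknil q (by simp [hq])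
  have hkvnil : kv.1 ≠ [] := hknil kv (by simp)
  have hk2 : 2 ≤ kv.1.length := (hg.2.1 kv hmem).1
  have hnodup : ((kv :: L').map (·.1)).Nodup :=
    List.Nodup.sublist (hsuf.sublist.map (·.1)) hg.1
  have hne : ∀ q ∈ L', q.1 ≠ kv.1 := by
    intro q hq hc
    simp only [List.map_cons, List.nodup_cons] at hnodup
    exact hnodup.1 (hc ▸ List.mem_map_of_mem hq)
  intro n
  induction n with
  | zero =>
    intro s hs
    have : s = [] := List.eq_nil_of_length_eq_zero (Nat.le_zero.mp hs)
    subst this; rfl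
  | succ n ih =>
    intro s hs
    cases s with
    | nil => rfl
    | cons c t =>
      by_cases hkpre : kv.1 <+: (c :: t)
      · -- the head key matches here
        obtain ⟨t₂, ht₂⟩ := hkpre
        have hdrop : (c :: t).drop kv.1.length = t₂ := by
          rw [← ht₂]; exact List.drop_left
        rw [pvRep_pos kv.1 kv.2 c t hkvnil ⟨t₂, ht₂⟩, hdrop]
        have hskip := pvScanSkip L' kv.2 (pvRep kv.1 kv.2 t₂)
          (fun i hi q hq => by
            have := (hg.2.2 kv hmem q (hmemT q (by simp [hq]))).2.2.2 i hi
            exact ⟨this.1, this.2⟩)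
        rw [hskip]
        have ht₂len : t₂.length ≤ n := by
          have : (c :: t).length = kv.1.length + t₂.length := by rw [← ht₂]; simp
          simp at this hs; omega
        rw [ih t₂ ht₂len]
        have hfind : (kv :: L').find? (fun p => p.1.isPrefixOf (c :: t)) = some kv := by
          simp only [List.find?]
          rw [List.isPrefixOf_iff_prefix.mpr ⟨t₂, ht₂⟩]
        rw [pvScan_match (kv :: L') hknil c t kv hfind, hdrop]
      · -- the head key does not match at this position
        rw [pvRep_neg kv.1 kv.2 c t hkpre]
        have hcongr : ∀ q ∈ L',
            (q.1.isPrefixOf (c :: pvRep kv.1 kv.2 t)) = (q.1.isPrefixOf (c :: t)) := by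
          intro q hq
          have hq2 : 2 ≤ q.1.length := (hg.2.1 q (hmemT q (by simp [hq]))).1
          have h0 : 0 < q.1.length := by omega
          have h1 : 1 < q.1.length := by omega
          have hpres := pvPres T hg kv hmem q (hmemT q (by simp [hq])) (hne q hq)
            t.length t le_rfl 1 h1
          have hqeq : q.1 = q.1[0] :: q.1.drop 1 := by
            rw [← List.drop_eq_getElem_cons h0, List.drop_zero]
          rcases hbt : q.1.isPrefixOf (c :: t) with _ | _
          · rw [Bool.eq_false_iff]
            intro hc
            have := List.isPrefixOf_iff_prefix.mp hc
            rw [hqeq, List.cons_prefix_cons] at this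
            have hbt' : q.1 <+: (c :: t) := by
              rw [hqeq, List.cons_prefix_cons]
              exact ⟨this.1, (hpres).mp this.2⟩
            rw [List.isPrefixOf_iff_prefix.mpr hbt'] at hbt
            exact absurd hbt (by simp)
          · have := List.isPrefixOf_iff_prefix.mp hbt
            rw [hqeq, List.cons_prefix_cons] at this
            apply List.isPrefixOf_iff_prefix.mpr
            rw [hqeq, List.cons_prefix_cons]
            exact ⟨this.1, (hpres).mpr this.2⟩
        have hfc := pvFind?_congr (fun p => p.1.isPrefixOf (c :: pvRep kv.1 kv.2 t))
          (fun p => p.1.isPrefixOf (c :: t)) L' hcongr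
        cases hfind : L'.find? (fun p => p.1.isPrefixOf (c :: t)) with
        | none =>
          rw [pvScan_nomatch L' c (pvRep kv.1 kv.2 t) (hfc.trans hfind)]
          rw [ih t (by simpa using hs)]
          have hfind' : (kv :: L').find? (fun p => p.1.isPrefixOf (c :: t)) = none := by
            simp only [List.find?]
            rw [Bool.eq_false_iff.mpr (fun hc => hkpre (List.isPrefixOf_iff_prefix.mp hc))]
            exact hfind
          rw [pvScan_nomatch (kv :: L') c t hfind']
        | some q =>
          have hqmem : q ∈ L' := List.mem_of_find?_eq_some hfind
          have hqpre : q.1 <+: (c :: t) :=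
            List.isPrefixOf_iff_prefix.mp
              (List.find?_some (p := fun (r : List Char × List Char) => r.1.isPrefixOf (c :: t)) hfind)
          have hq2 : 2 ≤ q.1.length := (hg.2.1 q (hmemT q (by simp [hqmem]))).1
          obtain ⟨t₂, ht₂⟩ := hqpre
          have h0 : 0 < q.1.length := by omega
          have hqeq : q.1 = q.1[0] :: q.1.drop 1 := by
            rw [← List.drop_eq_getElem_cons h0, List.drop_zero]
          have hc0 : q.1[0] = c := by
            have := ht₂
            rw [hqeq] at this
            simp at this
            exact this.1
          have htw : t = q.1.drop 1 ++ t₂ := by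
            have := ht₂
            rw [hqeq] at this
            simp [hc0] at this
            rw [List.drop_one]
            exact this.symm
          have hrepskip : pvRep kv.1 kv.2 t = q.1.drop 1 ++ pvRep kv.1 kv.2 t₂ := by
            rw [htw]
            apply pvRepSkip kv.1 kv.2
            intro i hi
            have hi' : 1 + i < q.1.length := by
              have := List.length_drop (l := q.1) (i := 1)
              omega
            have := (hg.2.2 kv hmem q (hmemT q (by simp [hqmem]))).2.1 (1 + i) hi' (by omega)
            rw [List.drop_drop] at *
            constructor
            · intro hc
              exact this.2 (by simpa [Nat.add_comm] using hc)
            · intro hc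
              exact this.1 (by simpa [Nat.add_comm] using hc)
          have hfind₂ : L'.find? (fun p => p.1.isPrefixOf (c :: pvRep kv.1 kv.2 t)) = some q :=
            hfc.trans hfind
          rw [pvScan_match L' hknil' c (pvRep kv.1 kv.2 t) q hfind₂]
          have hdropL : (c :: pvRep kv.1 kv.2 t).drop q.1.length = pvRep kv.1 kv.2 t₂ := by
            rw [hrepskip]
            have : c :: (q.1.drop 1 ++ pvRep kv.1 kv.2 t₂) = q.1 ++ pvRep kv.1 kv.2 t₂ := by
              conv_rhs => rw [hqeq]
              simp [hc0]
            rw [this]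
            exact List.drop_left
          rw [hdropL]
          have ht₂len : t₂.length ≤ n := by
            have : (c :: t).length = q.1.length + t₂.length := by rw [← ht₂]; simp
            simp at this hs; omega
          rw [ih t₂ ht₂len]
          have hfind' : (kv :: L').find? (fun p => p.1.isPrefixOf (c :: t)) = some q := by
            simp only [List.find?]
            rw [Bool.eq_false_iff.mpr (fun hc => hkpre (List.isPrefixOf_iff_prefix.mp hc))]
            exact hfind
          rw [pvScan_match (kv :: L') hknil c t q hfind']
          have hdropR : (c :: t).drop q.1.length = t₂ := by
            rw [← ht₂]; exact List.drop_left
          rw [hdropR]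

theorem pvFoldScan (T : List (List Char × List Char)) (hg : pvGood T) :
    ∀ (L : List (List Char × List Char)), L <:+ T → ∀ (s : List Char),
      L.foldl (fun m kv => pvRep kv.1 kv.2 m) s = pvScan L s := by
  intro L
  induction L with
  | nil => intro _ s; rw [List.foldl_nil]; exact (pvScan_nilTbl s.length s).symm
  | cons kv L' ih =>
    intro hsuf s
    have hsuf' : L' <:+ T := (List.suffix_cons kv L').trans hsuf
    rw [List.foldl_cons, ih hsuf' (pvRep kv.1 kv.2 s)]
    exact pvScanRep T hg kv L' hsuf s.length s le_rfl

theorem pvAFold_toList :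
    ∀ (ms : List (String × String)) (s : String),
      (ms.foldl (fun m kv => PySem.Str.replace m kv.1 kv.2) s).toList =
      (ms.map (fun kv => (kv.1.toList, kv.2.toList))).foldl
        (fun l kv => PySem.Chars.replace l kv.1 kv.2) s.toList := by
  intro ms
  induction ms with
  | nil => intro s; simp
  | cons kv ms ih =>
    intro s
    rw [List.foldl_cons, List.map_cons, List.foldl_cons, ih, PySem.Str.toList_replace]

theorem pvChainRep (L : List (List Char × List Char)) (hk : ∀ p ∈ L, p.1 ≠ []) :
    ∀ (l : List Char),
      L.foldl (fun l kv => PySem.Chars.replace l kv.1 kv.2) l =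
      L.foldl (fun m kv => pvRep kv.1 kv.2 m) l := by
  induction L with
  | nil => intro l; rfl
  | cons kv L' ih =>
    intro l
    rw [List.foldl_cons, List.foldl_cons,
        pvReplace_eq_rep l kv.1 kv.2 (hk kv (by simp))]
    exact ih (fun p hp => hk p (by simp [hp])) _

set_option maxHeartbeats 2000000 in
theorem pvGood_table : pvGood pvBTable := by unfold pvGood; decide

theorem pvMap_eq : pvAMacros.map (fun kv => (kv.1.toList, kv.2.toList)) = pvBTable := by decide

-- ===== VERDICT (by name: the statement is the Claim_ definition above) =====
theorem expand_message_spec : Claim_equal_expand_message := by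
  intro message _
  show expand_message message = expand_message_alt message
  apply String.toList_inj.mp
  have hk : ∀ p ∈ pvBTable, p.1 ≠ [] := by
    intro p hp hc
    have := (pvGood_table.2.1 p hp).1
    rw [hc] at this; simp at this
  calc (expand_message message).toList
      = pvBTable.foldl (fun l kv => PySem.Chars.replace l kv.1 kv.2) message.toList := by
        rw [expand_message, pvAFold_toList, pvMap_eq]
    _ = pvBTable.foldl (fun m kv => pvRep kv.1 kv.2 m) message.toList := pvChainRep pvBTable hk _
    _ = pvScan pvBTable message.toList := pvFoldScan pvBTable pvGood_table pvBTable (List.suffix_refl _) _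
    _ = (expand_message_alt message).toList := by
        rw [expand_message_alt, String.toList_ofList]; rfl
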